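-- pv_equiv track=rewrite | github.com/GaelleLeTreut/IMACLIM-Country | outputs_display/read_outputs.py | record_first_col
-- ===== SOURCE A (Python) =====
-- def record_first_col(outputs, file_name):
--     """Return the first column of file_name.
--        Return an error if the first columns are not consistent."""
--
--     # First column of one file
--     fold0 = list(outputs.keys())[0]
--     time0 = list(outputs[fold0].keys())[0]
--
--     file0 = outputs[fold0][time0]
--     first_col = [row[0] for row in file0]
--
--     # Check that the first column is the same for every file
--     for fold in outputs.keys():
--         for time in outputs[fold].keys():
--
--             file = outputs[fold][time]
--             file_first_col = [row[0] for row in file]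
--
--             if file_first_col != first_col:
--                 raise Exception('Different first column in outputs of : ' \
--                                  + file_name)
--
--     return first_col
-- ===== SOURCE B (Python) =====
-- def record_first_col(outputs, file_name):
--     """Return the first column of file_name.
--        Return an error if the first columns are not consistent."""
--     # Transposed traversal: flatten all files, check all row counts match the
--     # first file, then walk row INDICES, comparing the head cell across files.
--     files = [file for times in outputs.values() for file in times.values()]
--     ref = files[0]
--     if any(len(f) != len(ref) for f in files):
--         raise Exception('Different first column in outputs of : ' + file_name)
--     first_col = []
--     for i in range(len(ref)):
--         head = ref[i][0]
--         if any(f[i][0] != head for f in files):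
--             raise Exception('Different first column in outputs of : ' + file_name)
--         first_col.append(head)
--     return first_col
-- ===== Notes on version B (the rewrite author's own statement) =====
-- stated objective: alternative
-- what changed: A builds each file's whole first column and compares it as a list against a reference column; B transposes the traversal: it flattens the files once, checks row counts, then iterates over row indices and compares the single head cell at each index across all files, building the result cell by cell.
import Mathlib
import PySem

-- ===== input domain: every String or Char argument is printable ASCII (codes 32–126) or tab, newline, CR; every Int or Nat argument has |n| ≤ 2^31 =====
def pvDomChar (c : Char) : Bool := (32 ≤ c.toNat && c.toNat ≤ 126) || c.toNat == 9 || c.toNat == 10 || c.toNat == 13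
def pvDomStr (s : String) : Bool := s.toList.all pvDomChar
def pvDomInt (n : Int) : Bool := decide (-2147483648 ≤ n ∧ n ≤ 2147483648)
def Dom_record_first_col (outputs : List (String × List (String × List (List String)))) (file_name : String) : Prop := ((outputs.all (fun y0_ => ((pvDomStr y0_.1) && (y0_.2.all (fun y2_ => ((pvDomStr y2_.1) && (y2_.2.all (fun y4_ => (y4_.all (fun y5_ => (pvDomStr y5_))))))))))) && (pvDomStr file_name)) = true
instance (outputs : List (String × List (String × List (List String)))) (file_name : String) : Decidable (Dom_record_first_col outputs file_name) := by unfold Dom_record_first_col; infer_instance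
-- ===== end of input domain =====

-- B transposes the traversal: instead of building each file's first column and
-- comparing lists, it walks row indices and compares the head cell across all
-- files (objective: alternative). Equivalence is claimed on Pre_, the inputs
-- where A returns normally.

-- ===== PORT A =====
-- A's comprehension "[row[0] for row in file]" (none = IndexError)
def rfc_firstColOf (file : List (List String)) : Option (List String) :=
  file.mapM (fun row => PySem.List.pyGet? row 0)

def record_first_col (outputs : List (String × List (String × List (List String)))) (file_name : String) : List String :=
  (match outputs.head? with
   | none => none
   | some (_fold0, times0) =>
     match times0.head? with
     | none => none
     | some (_time0, file0) =>
       match rfc_firstColOf file0 with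
       | none => none
       | some first_col =>
         -- the nested check loop: raise (none) on any mismatching / ill-formed column
         if outputs.all (fun fold => fold.2.all (fun time => rfc_firstColOf time.2 == some first_col))
         then some first_col else none).getD []

-- ===== PORT B =====
-- raise = none; inside the per-index `any`, an IndexError (empty row) and a
-- mismatch both end the computation, so both map to the overall none
def record_first_col_alt (outputs : List (String × List (String × List (List String)))) (file_name : String) : List String :=
  (let files : List (List (List String)) := outputs.flatMap (fun p => p.2.map (fun q => q.2))
   files.head?.bind (fun ref =>
     if files.any (fun f => decide (f.length ≠ ref.length)) then none
     else
       (List.range ref.length).foldlM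
         (fun (acc : List String) (i : Nat) =>
           (PySem.List.pyGet? ref (i : Int)).bind (fun row =>
             (PySem.List.pyGet? row 0).bind (fun head =>
               if files.any (fun f =>
                   decide (((PySem.List.pyGet? f (i : Int)).bind
                     (fun r => PySem.List.pyGet? r 0)) ≠ some head))
               then none
               else some (acc ++ [head])))) [])).getD []

-- ===== PRECONDITION & SPEC =====
def rfc_refCol (outputs : List (String × List (String × List (List String)))) : List String :=
  (((outputs.headD ("", [])).2.headD ("", [])).2).map (fun row => row.headD "")

-- Pre_ admits exactly the inputs on which A returns normally: outputs nonempty with a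
-- nonempty first inner dict, every row nonempty (else IndexError), and every file's
-- first column equal to the first file's (else the explicit Exception is raised).
def Pre_record_first_col (outputs : List (String × List (String × List (List String)))) (file_name : String) : Prop :=
  outputs ≠ [] ∧ (outputs.headD ("", [])).2 ≠ [] ∧
  ∀ p ∈ outputs, ∀ q ∈ p.2,
    (∀ row ∈ q.2, row ≠ []) ∧ q.2.map (fun row => row.headD "") = rfc_refCol outputs
instance (outputs : List (String × List (String × List (List String)))) (file_name : String) : Decidable (Pre_record_first_col outputs file_name) := by unfold Pre_record_first_col; infer_instance

def pvWitness_record_first_col : (List (String × List (String × List (List String)))) × String :=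
  ([("f", [("t", [["a", "1"], ["b", "2"]]), ("u", [["a", "x"], ["b", "y"]])])], "out.csv")

def Spec_record_first_col (outputs : List (String × List (String × List (List String)))) (file_name : String) (out : List String) : Prop := out = record_first_col_alt outputs file_name
instance (outputs : List (String × List (String × List (List String)))) (file_name : String) (out : List String) : Decidable (Spec_record_first_col outputs file_name out) := by unfold Spec_record_first_col; infer_instance

-- ===== CLAIM =====
def Claim_equal_record_first_col : Prop := ∀ (outputs : List (String × List (String × List (List String)))) (file_name : String), Dom_record_first_col outputs file_name → Pre_record_first_col outputs file_name → Spec_record_first_col outputs file_name (record_first_col outputs file_name)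

-- ===== LEMMAS AND PROOFS =====

-- the comprehension succeeds on nonempty rows and yields the heads
theorem rfc_firstColOf_eq (file : List (List String)) (h : ∀ row ∈ file, row ≠ []) :
    rfc_firstColOf file = some (file.map (fun row => row.headD "")) := by
  induction file with
  | nil => rfl
  | cons r rs ih =>
    obtain ⟨x, xs, rfl⟩ := List.exists_cons_of_ne_nil (h r (by simp))
    have ihr := ih (fun row hm => h row (by simp [hm]))
    simp only [rfc_firstColOf] at ihr ⊢
    simp [List.mapM_cons, ihr]

-- B's index loop: if every step appends g i, the fold yields the map over the list
theorem rfc_fold_map {α : Type} (step : List α → Nat → Option (List α)) (g : Nat → α)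
    (l : List Nat) (hstep : ∀ i ∈ l, ∀ acc, step acc i = some (acc ++ [g i])) :
    ∀ acc, l.foldlM step acc = some (acc ++ l.map g) := by
  induction l with
  | nil => intro acc; simp
  | cons i is ih =>
    intro acc
    rw [List.foldlM_cons, hstep i (by simp) acc]
    simp only [Option.bind_eq_bind, Option.bind_some]
    rw [ih (fun j hj => hstep j (by simp [hj]))]
    simp

theorem rfc_range_map_getD (col : List String) :
    (List.range col.length).map (fun i => col.getD i "") = col := by
  apply List.ext_getElem
  · simp
  · intro i h1 h2
    simp [List.getD_eq_getElem?_getD, List.getElem?_eq_getElem h2]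

-- ===== VERDICT =====
theorem record_first_col_spec : Claim_equal_record_first_col := by
  intro outputs file_name _hdom hpre
  obtain ⟨hne, hne2, hall⟩ := hpre
  obtain ⟨⟨f0, times0⟩, rest, rfl⟩ := List.exists_cons_of_ne_nil hne
  simp only [List.headD_cons] at hne2
  obtain ⟨⟨t0, file0⟩, ts, rfl⟩ := List.exists_cons_of_ne_nil hne2
  have href : rfc_refCol ((f0, (t0, file0) :: ts) :: rest)
      = file0.map (fun row => row.headD "") := rfl
  rw [href] at hall
  -- every flattened file has nonempty rows and heads = col
  have hfiles : ∀ f ∈ (((f0, (t0, file0) :: ts) :: rest).flatMap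
        (fun p => p.2.map (fun q => q.2))),
      (∀ row ∈ f, row ≠ []) ∧ f.map (fun row => row.headD "") = file0.map (fun row => row.headD "") := by
    intro f hf
    simp only [List.mem_flatMap, List.mem_map] at hf
    obtain ⟨p, hp, q, hq, rfl⟩ := hf
    exact hall p hp q hq
  have hcol : ∀ p ∈ ((f0, (t0, file0) :: ts) :: rest), ∀ q ∈ p.2,
      rfc_firstColOf q.2 = some (file0.map (fun row => row.headD "")) := by
    intro p hp q hq
    obtain ⟨hrows, heq⟩ := hall p hp q hq
    rw [rfc_firstColOf_eq q.2 hrows, heq]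
  have hfile0 : rfc_firstColOf file0 = some (file0.map (fun row => row.headD "")) :=
    hcol (f0, (t0, file0) :: ts) (by simp) (t0, file0) (by simp)
  -- A's side
  have hallb : ((((f0, (t0, file0) :: ts) :: rest)).all (fun fold => fold.2.all
      (fun time => rfc_firstColOf time.2 == some (file0.map (fun row => row.headD ""))))) = true := by
    simp only [List.all_eq_true]
    intro p hp q hq
    simp [hcol p hp q hq]
  have hA : record_first_col ((f0, (t0, file0) :: ts) :: rest) file_name
      = file0.map (fun row => row.headD "") := by
    simp only [record_first_col, List.head?_cons, hfile0, hallb]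
    simp
  -- B's side
  have hlen : ∀ f ∈ (((f0, (t0, file0) :: ts) :: rest).flatMap
        (fun p => p.2.map (fun q => q.2))), f.length = file0.length := by
    intro f hf
    have h1 : (f.map (fun row => row.headD "")).length
        = (file0.map (fun row => row.headD "")).length := by rw [(hfiles f hf).2]
    simpa using h1
  have hlenchk : ((((f0, (t0, file0) :: ts) :: rest).flatMap
        (fun p => p.2.map (fun q => q.2))).any
      (fun f => decide (f.length ≠ file0.length))) = false := by
    simp only [List.any_eq_false, decide_eq_true_eq, not_not]
    intro f hf; exact hlen f hf
  -- each step of the index loop appends col[i]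
  have key : ∀ (i : Nat), i < file0.length → ∀ f, (∀ row ∈ f, row ≠ []) →
      f.map (fun row => row.headD "") = file0.map (fun row => row.headD "") →
      ((PySem.List.pyGet? f (i : Int)).bind (fun r => PySem.List.pyGet? r 0))
        = some ((file0.map (fun row => row.headD "")).getD i "") := by
    intro i hi f hrows hmap
    have hflen : f.length = file0.length := by
      have h1 : (f.map (fun row => row.headD "")).length
          = (file0.map (fun row => row.headD "")).length := by rw [hmap]
      simpa using h1
    have hif : i < f.length := by omega
    rw [PySem.List.pyGet?_natCast, List.getElem?_eq_getElem hif]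
    simp only [Option.bind_some]
    obtain ⟨x, xs, hx⟩ := List.exists_cons_of_ne_nil (hrows f[i] (List.getElem_mem hif))
    rw [hx, PySem.List.pyGet?_zero_cons]
    have hgd : (file0.map (fun row => row.headD "")).getD i ""
        = f[i].headD "" := by
      rw [← hmap]
      rw [List.getD_eq_getElem?_getD, List.getElem?_map, List.getElem?_eq_getElem hif]
      simp
    rw [hgd, hx]
    simp
  have hstep : ∀ i ∈ List.range file0.length, ∀ acc : List String,
      ((PySem.List.pyGet? file0 (i : Int)).bind (fun row =>
        (PySem.List.pyGet? row 0).bind (fun head =>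
          if (((f0, (t0, file0) :: ts) :: rest).flatMap
                (fun p => p.2.map (fun q => q.2))).any (fun f =>
              decide (((PySem.List.pyGet? f (i : Int)).bind
                (fun r => PySem.List.pyGet? r 0)) ≠ some head))
          then none
          else some (acc ++ [head]))))
        = some (acc ++ [(file0.map (fun row => row.headD "")).getD i ""]) := by
    intro i hi acc
    simp only [List.mem_range] at hi
    have hf0 := key i hi file0
        (hall (f0, (t0, file0) :: ts) (by simp) (t0, file0) (by simp)).1
        (hall (f0, (t0, file0) :: ts) (by simp) (t0, file0) (by simp)).2
    have hany : ((((f0, (t0, file0) :: ts) :: rest).flatMap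
          (fun p => p.2.map (fun q => q.2))).any (fun f =>
        decide (((PySem.List.pyGet? f (i : Int)).bind
          (fun r => PySem.List.pyGet? r 0))
            ≠ some ((file0.map (fun row => row.headD "")).getD i "")))) = false := by
      simp only [List.any_eq_false, decide_eq_true_eq, ne_eq, Decidable.not_not]
      intro f hf
      exact key i hi f (hfiles f hf).1 (hfiles f hf).2
    rw [PySem.List.pyGet?_natCast] at hf0 ⊢
    rw [List.getElem?_eq_getElem hi] at hf0 ⊢
    simp only [Option.bind_some] at hf0 ⊢
    rw [hf0]
    simp only [Option.bind_some]
    rw [hany]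
    simp
  have hfold := rfc_fold_map _ (fun i => (file0.map (fun row => row.headD "")).getD i "")
      (List.range file0.length) hstep []
  have hB : record_first_col_alt ((f0, (t0, file0) :: ts) :: rest) file_name
      = file0.map (fun row => row.headD "") := by
    have hhead : ((((f0, (t0, file0) :: ts) :: rest).flatMap
        (fun p => p.2.map (fun q => q.2))).head?) = some file0 := by simp
    simp only [record_first_col_alt]
    rw [hhead]
    simp only [Option.bind_some]
    rw [hlenchk]
    simp only [Bool.false_eq_true, if_false]
    rw [show (List.range file0.length).foldlM _ ([] : List String)
        = some ([] ++ (List.range file0.length).map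
            (fun i => (file0.map (fun row => row.headD "")).getD i "")) from hfold]
    have hr : (List.range file0.length).map
        (fun i => (file0.map (fun row => row.headD "")).getD i "")
        = file0.map (fun row => row.headD "") := by
      have h1 : file0.length = (file0.map (fun row => row.headD "")).length := by simp
      rw [h1]; exact rfc_range_map_getD _
    simp only [Option.getD_some, List.nil_append]
    exact hr
  unfold Spec_record_first_col
  rw [hA, hB]
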